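-- pv_equiv track=rewrite | github.com/johnnyyan/515project | data/code/featureCodeAnalysis.py | deepestCode
-- ===== SOURCE A (Python) =====
-- def deepestCode(source, max_depth):
--     deepest_code = ""
--     depth = 0
--     for i in range(len(source)):
--         c = source[i]
--         if c=='{':
--             depth+=1
--         elif c=='}':
--             depth = max(0, depth-1)
--         elif depth == max_depth:
--             deepest_code += c
--     # print deepest_code
--     # raw_input()
--     return deepest_code
-- ===== SOURCE B (Python) =====
-- def deepestCode(source, max_depth):
--     # Recursive descent over the brace structure: block(i, depth) consumes one
--     # brace-delimited block, recursing into nested '{...}' blocks, and returns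
--     # the index just past its closing '}' (or the end of the string).  An
--     # unmatched '}' at the top level simply ends the current top-level block,
--     # which matches clamping the depth at zero.
--     out = []
--     n = len(source)
--
--     def block(i, depth):
--         while i < n:
--             c = source[i]
--             if c == '{':
--                 i = block(i + 1, depth + 1)
--             elif c == '}':
--                 return i + 1
--             else:
--                 if depth == max_depth:
--                     out.append(c)
--                 i += 1
--         return i
--
--     i = 0
--     while i < n:
--         i = block(i, 0)
--     return ''.join(out)
-- ===== Notes on version B (the rewrite author's own statement) =====
-- stated objective: alternative
-- what changed: Replaces A's flat scan with a mutable depth counter by a recursive-descent parser over the brace structure: block(i, depth) recurses into each nested '{...}' block and returns the index past its closing brace, with a top-level driver loop absorbing unmatched '}' (A's clamp at zero).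
import Mathlib
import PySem

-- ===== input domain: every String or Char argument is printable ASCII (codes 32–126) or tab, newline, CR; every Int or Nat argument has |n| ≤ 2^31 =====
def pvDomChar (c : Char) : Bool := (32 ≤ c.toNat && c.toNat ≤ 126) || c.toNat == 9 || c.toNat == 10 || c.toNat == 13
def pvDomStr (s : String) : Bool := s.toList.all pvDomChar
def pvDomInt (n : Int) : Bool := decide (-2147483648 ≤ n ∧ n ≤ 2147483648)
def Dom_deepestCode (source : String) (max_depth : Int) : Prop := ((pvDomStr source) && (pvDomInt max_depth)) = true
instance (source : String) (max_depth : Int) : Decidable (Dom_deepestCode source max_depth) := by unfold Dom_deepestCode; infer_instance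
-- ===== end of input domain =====

-- B replaces A's flat counter scan by a recursive-descent parser over the
-- brace structure (one recursive call per nested block); alternative, not faster.

-- ===== PORT A =====
-- A: one loop over the characters holding (accumulated string, current depth).
def deepestCode (source : String) (max_depth : Int) : String :=
  (source.toList.foldl
    (fun (st : String × Int) c =>
      if c = '{' then (st.1, st.2 + 1)
      else if c = '}' then (st.1, max 0 (st.2 - 1))
      else if st.2 = max_depth then (st.1.push c, st.2)
      else st)
    ("", 0)).1

-- ===== PORT B =====
-- B's block(i, depth): consumes one brace-delimited block of the character list,
-- recursing into nested '{...}' blocks; returns (collected chars, rest after the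
-- closing '}').  fuel (≥ list length) only guarantees totality.
def dcBlock (m : Int) : Nat → List Char → Int → (List Char × List Char)
  | 0, cs, _ => ([], cs)
  | fuel + 1, cs, depth =>
    match cs with
    | [] => ([], [])
    | c :: rest =>
      if c = '{' then
        let p1 := dcBlock m fuel rest (depth + 1)
        let p2 := dcBlock m fuel p1.2 depth
        (p1.1 ++ p2.1, p2.2)
      else if c = '}' then ([], rest)
      else
        let p := dcBlock m fuel rest depth
        ((if depth = m then [c] else []) ++ p.1, p.2)

-- B's top-level driver: repeatedly parse a top-level block at depth 0.
def dcTop (m : Int) : Nat → List Char → List Char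
  | 0, _ => []
  | fuel + 1, cs =>
    match cs with
    | [] => []
    | _ :: _ =>
      let p := dcBlock m cs.length cs 0
      p.1 ++ dcTop m fuel p.2

def deepestCode_alt (source : String) (max_depth : Int) : String :=
  String.ofList (dcTop max_depth source.toList.length source.toList)

-- ===== PRECONDITION & SPEC =====
def Spec_deepestCode (source : String) (max_depth : Int) (out : String) : Prop := out = deepestCode_alt source max_depth
instance (source : String) (max_depth : Int) (out : String) : Decidable (Spec_deepestCode source max_depth out) := by unfold Spec_deepestCode; infer_instance

-- ===== CLAIM =====
def Claim_equal_deepestCode : Prop := ∀ (source : String) (max_depth : Int), Dom_deepestCode source max_depth → Spec_deepestCode source max_depth (deepestCode source max_depth)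

-- ===== LEMMAS AND PROOFS =====

-- reference: the selected characters, A's scan as structural recursion
def dcSel (cs : List Char) (d m : Int) : List Char :=
  match cs with
  | [] => []
  | c :: cs =>
    if c = '{' then dcSel cs (d + 1) m
    else if c = '}' then dcSel cs (max 0 (d - 1)) m
    else if d = m then c :: dcSel cs d m
    else dcSel cs d m

theorem dcA_eq (m : Int) : ∀ (cs : List Char) (acc : String) (d : Int),
    (cs.foldl
      (fun (st : String × Int) c =>
        if c = '{' then (st.1, st.2 + 1)
        else if c = '}' then (st.1, max 0 (st.2 - 1))
        else if st.2 = m then (st.1.push c, st.2)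
        else st)
      (acc, d)).1 = acc ++ String.ofList (dcSel cs d m) := by
  intro cs
  induction cs with
  | nil => intro acc d; simp [dcSel]
  | cons c cs ih =>
    intro acc d
    by_cases h1 : c = '{'
    · simp [h1, dcSel, ih]
    · by_cases h2 : c = '}'
      · simp [h2, dcSel, ih]
      · by_cases h3 : d = m
        · simp [h1, h2, h3, dcSel, ih]
          rw [← String.toList_inj]
          simp
        · simp [h1, h2, h3, dcSel, ih]

-- the rest returned by dcBlock is a suffix-length bound
theorem dcBlock_len (m : Int) : ∀ (fuel : Nat) (cs : List Char) (d : Int),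
    (dcBlock m fuel cs d).2.length ≤ cs.length := by
  intro fuel
  induction fuel with
  | zero => intro cs d; simp [dcBlock]
  | succ f ih =>
    intro cs d
    match cs with
    | [] => simp [dcBlock]
    | c :: rest =>
      by_cases h1 : c = '{'
      · have h2 := ih rest (d + 1)
        have h3 := ih (dcBlock m f rest (d + 1)).2 d
        simp [dcBlock, h1]
        omega
      · by_cases h2 : c = '}'
        · simp [dcBlock, h2]
        · have h3 := ih rest d
          simp [dcBlock, h1, h2]
          omega

-- main invariant: dcBlock splits A's selection at the unmatched '}'
theorem dcBlock_sel (m : Int) : ∀ (fuel : Nat) (cs : List Char) (d : Int),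
    cs.length ≤ fuel → 0 ≤ d →
    dcSel cs d m =
      (dcBlock m fuel cs d).1 ++ dcSel (dcBlock m fuel cs d).2 (max 0 (d - 1)) m := by
  intro fuel
  induction fuel with
  | zero =>
    intro cs d hlen _
    have : cs = [] := List.eq_nil_of_length_eq_zero (Nat.le_zero.mp hlen)
    subst this; simp [dcBlock, dcSel]
  | succ f ih =>
    intro cs d hlen hd
    match cs with
    | [] => simp [dcBlock, dcSel]
    | c :: rest =>
      have hrest : rest.length ≤ f := by simpa using hlen
      by_cases h1 : c = '{'
      · have e1 := ih rest (d + 1) hrest (by omega)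
        have hlen2 : (dcBlock m f rest (d + 1)).2.length ≤ f :=
          le_trans (dcBlock_len m f rest (d + 1)) hrest
        have e2 := ih (dcBlock m f rest (d + 1)).2 d hlen2 hd
        have hmax : max 0 (d + 1 - 1) = d := by omega
        simp only [dcSel, dcBlock, h1, if_pos rfl, if_true]
        rw [e1, hmax, e2]
        simp
      · by_cases h2 : c = '}'
        · simp [dcSel, dcBlock, h1, h2]
        · have e := ih rest d hrest hd
          by_cases h3 : d = m
          · subst h3
            simp [dcSel, dcBlock, h1, h2, e]
          · simp [dcSel, dcBlock, h1, h2, h3, e]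

-- strict decrease of the rest on a nonempty block
theorem dcBlock_len_lt (m : Int) (c : Char) (rest : List Char) (d : Int) :
    (dcBlock m (c :: rest).length (c :: rest) d).2.length < (c :: rest).length := by
  by_cases h1 : c = '{'
  · have h2 := dcBlock_len m rest.length rest (d + 1)
    have h3 := dcBlock_len m rest.length (dcBlock m rest.length rest (d + 1)).2 d
    simp [dcBlock, h1]
    omega
  · by_cases h2 : c = '}'
    · simp [dcBlock, h2]
    · have h3 := dcBlock_len m rest.length rest d
      simp [dcBlock, h1, h2]
      omega

theorem dcTop_eq (m : Int) : ∀ (fuel : Nat) (cs : List Char),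
    cs.length ≤ fuel → dcTop m fuel cs = dcSel cs 0 m := by
  intro fuel
  induction fuel with
  | zero =>
    intro cs hlen
    have : cs = [] := List.eq_nil_of_length_eq_zero (Nat.le_zero.mp hlen)
    subst this; simp [dcTop, dcSel]
  | succ f ih =>
    intro cs hlen
    match cs with
    | [] => simp [dcTop, dcSel]
    | c :: rest =>
      have hsplit := dcBlock_sel m (c :: rest).length (c :: rest) 0 (le_refl _) (le_refl _)
      have hlt := dcBlock_len_lt m c rest 0
      have hrec := ih (dcBlock m (c :: rest).length (c :: rest) 0).2 (by omega)
      simp only [dcTop]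
      rw [hrec, hsplit]
      norm_num

-- ===== VERDICT =====
theorem deepestCode_spec : Claim_equal_deepestCode := by
  intro source max_depth _
  unfold Spec_deepestCode deepestCode deepestCode_alt
  rw [dcA_eq max_depth source.toList "" 0, dcTop_eq max_depth source.toList.length source.toList (le_refl _)]
  simp
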